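-- pv_equiv track=rewrite | github.com/j-tyler/api-parity | api_parity/cli.py | _enumerate_possible_chain_signatures
-- ===== SOURCE A (Python) =====
-- def _enumerate_possible_chain_signatures(
--     edges: list[tuple[str, str]],
--     linked_ops: set[str],
--     max_steps: int,
--     max_signatures: int = 50_000,
-- ) -> set[tuple[str, ...]] | None:
--     """Enumerate all possible unique chain signatures from the link graph.
--
--     A chain signature is a tuple of operation IDs representing a valid
--     multi-step sequence through the link graph. At each step, the next
--     operation must be reachable via a declared link from ANY previous
--     step in the chain (not just the immediately preceding step).
--
--     Args:
--         edges: Directed edges (source_op, target_op) from declared links.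
--         linked_ops: Set of operation IDs that participate in links.
--         max_steps: Maximum chain length.
--         max_signatures: Safety cap to prevent runaway enumeration on dense
--             graphs. If exceeded, returns None (caller falls back to current
--             behavior without per-op capping).
--
--     Returns:
--         Set of chain signature tuples (length >= 2), or None if the
--         safety cap was hit (graph too dense for enumeration).
--     """
--     # Build adjacency dict from deduplicated edges
--     adj: dict[str, set[str]] = {}
--     for source, target in set(edges):
--         if source not in adj:
--             adj[source] = set()
--         adj[source].add(target)
--
--     signatures: set[tuple[str, ...]] = set()
--
--     # DFS from every linked operation as the start
--     for start_op in linked_ops: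
--         # Stack holds (current_chain_tuple, set_of_ops_in_chain)
--         stack: list[tuple[tuple[str, ...], frozenset[str]]] = [
--             ((start_op,), frozenset({start_op}))
--         ]
--
--         while stack:
--             chain, ops_in_chain = stack.pop()
--
--             if len(chain) >= 2:
--                 signatures.add(chain)
--                 if len(signatures) > max_signatures:
--                     return None  # Safety cap hit
--
--             if len(chain) >= max_steps:
--                 continue
--
--             # Available next operations = union of adj[op] for all ops in chain
--             next_ops: set[str] = set()
--             for op in ops_in_chain:
--                 if op in adj:
--                     next_ops.update(adj[op])
--
--             for next_op in next_ops:
--                 new_chain = chain + (next_op,)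
--                 new_ops = ops_in_chain | frozenset({next_op})
--                 stack.append((new_chain, new_ops))
--
--     return signatures
-- ===== SOURCE B (Python) =====
-- def _enumerate_possible_chain_signatures(
--     edges,
--     linked_ops,
--     max_steps,
--     max_signatures=50_000,
-- ):
--     """Recursive DFS instead of an explicit stack: each call carries the
--     frontier of reachable next operations, extended incrementally with the
--     new op's adjacency, so the per-pop re-union of adj[op] over the whole
--     chain (and the ops_in_chain set) disappears.  visit() returns False as
--     soon as the signature cap is exceeded, which aborts the whole walk."""
--     adj = {}
--     for source, target in set(edges):
--         adj.setdefault(source, set()).add(target)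
--
--     empty = frozenset()
--     signatures = set()
--
--     def visit(chain, frontier):
--         # Returns False iff the safety cap was hit somewhere below.
--         if len(chain) >= 2:
--             signatures.add(chain)
--             if len(signatures) > max_signatures:
--                 return False
--         if len(chain) >= max_steps:
--             return True
--         for next_op in frontier:
--             if not visit(chain + (next_op,), frontier | adj.get(next_op, empty)):
--                 return False
--         return True
--
--     for start_op in linked_ops:
--         if not visit((start_op,), frozenset(adj.get(start_op, empty))):
--             return None
--
--     return signatures
-- ===== Notes on version B (the rewrite author's own statement) =====
-- stated objective: alternative
-- what changed: Replaces A's explicit-stack DFS that re-unions adj[op] over the whole ops_in_chain set on every pop by a recursive DFS whose calls carry the reachable frontier and extend it incrementally with just the new op's adjacency (the ops_in_chain set and the per-pop rescan of the chain disappear; the cap aborts via the recursion's boolean result instead of an early return from the loop).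
import Mathlib
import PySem

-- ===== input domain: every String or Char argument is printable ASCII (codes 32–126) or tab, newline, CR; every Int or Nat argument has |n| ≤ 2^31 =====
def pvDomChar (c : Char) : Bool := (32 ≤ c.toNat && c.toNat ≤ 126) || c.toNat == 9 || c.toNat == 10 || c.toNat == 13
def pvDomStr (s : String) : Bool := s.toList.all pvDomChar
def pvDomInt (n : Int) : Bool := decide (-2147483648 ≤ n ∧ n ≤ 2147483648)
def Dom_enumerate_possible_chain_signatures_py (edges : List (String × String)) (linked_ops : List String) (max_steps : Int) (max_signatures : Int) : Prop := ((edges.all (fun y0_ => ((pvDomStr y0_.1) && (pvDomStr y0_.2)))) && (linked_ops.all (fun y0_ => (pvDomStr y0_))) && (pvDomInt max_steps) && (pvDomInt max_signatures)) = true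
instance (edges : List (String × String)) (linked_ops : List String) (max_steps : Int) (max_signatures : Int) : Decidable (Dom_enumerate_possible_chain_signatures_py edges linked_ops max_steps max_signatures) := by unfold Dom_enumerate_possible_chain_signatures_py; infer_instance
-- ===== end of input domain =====

-- B replaces A's explicit-stack DFS (which re-unions adj[op] over the whole ops_in_chain set
-- on every pop) by a recursive DFS whose calls carry the reachable frontier and extend it
-- incrementally with just the new op's adjacency (objective: alternative).

-- Both ports use a step budget that only makes the recursion total; it is large enough for
-- every terminating Python run and both ports consume it in lockstep (one unit per node),
-- so the budget never decides the result differently between them.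
def pvChainFuel (edges : List (String × String)) (linked_ops : List String) (max_steps : Int) (max_signatures : Int) : Nat :=
  edges.length + linked_ops.length + max_steps.toNat + max_signatures.toNat + 1000

-- ===== PORT A =====
-- adj: dict built from deduplicated edges; 'if source not in adj: adj[source] = set()' then 'adj[source].add(target)'
def pvBuildAdjA (edges : List (String × String)) : PySem.Dict String (PySem.Set String) :=
  (PySem.Set.ofList edges).foldl
    (fun adj st =>
      let adj' := if adj.contains st.1 then adj else adj.insert st.1 PySem.Set.empty
      adj'.modify st.1 PySem.Set.empty (fun s => PySem.Set.add s st.2))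
    PySem.Dict.empty

-- next_ops = set(); for op in ops_in_chain: if op in adj: next_ops.update(adj[op])
def pvNextOpsA (adj : PySem.Dict String (PySem.Set String)) (ops : PySem.Set String) : PySem.Set String :=
  ops.foldl
    (fun acc op => if adj.contains op then PySem.Set.update acc (adj.getD op PySem.Set.empty) else acc)
    PySem.Set.empty

-- the 'while stack:' loop of A; stack top is the list head; none = 'return None' (or budget out)
def pvLoopA (adj : PySem.Dict String (PySem.Set String)) (max_steps max_signatures : Int) :
    Nat → List (List String × PySem.Set String) → PySem.Set (List String) → Option (PySem.Set (List String))
  | _, [], sigs => some sigs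
  | 0, _ :: _, _ => none
  | fuel+1, (chain, ops) :: stack, sigs =>
    let sigs' := if 2 ≤ chain.length then PySem.Set.add sigs chain else sigs
    if 2 ≤ chain.length ∧ max_signatures < (sigs'.length : Int) then none
    else if max_steps ≤ (chain.length : Int) then pvLoopA adj max_steps max_signatures fuel stack sigs'
    else
      pvLoopA adj max_steps max_signatures fuel
        ((pvNextOpsA adj ops).foldl (fun st n => (chain ++ [n], PySem.Set.add ops n) :: st) stack) sigs'

-- the 'for start_op in linked_ops:' loop of A
def pvRunA (adj : PySem.Dict String (PySem.Set String)) (max_steps max_signatures : Int) (fuel : Nat) :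
    List String → PySem.Set (List String) → Option (PySem.Set (List String))
  | [], sigs => some sigs
  | s :: rest, sigs =>
    match pvLoopA adj max_steps max_signatures fuel [([s], PySem.Set.ofList [s])] sigs with
    | none => none
    | some sigs' => pvRunA adj max_steps max_signatures fuel rest sigs'

def enumerate_possible_chain_signatures_py (edges : List (String × String)) (linked_ops : List String) (max_steps : Int) (max_signatures : Int) : Option (List (List String)) :=
  pvRunA (pvBuildAdjA edges) max_steps max_signatures
    (pvChainFuel edges linked_ops max_steps max_signatures) linked_ops PySem.Set.empty

-- ===== PORT B =====
-- adj.setdefault(source, set()).add(target)  (setdefault-then-mutate = modify with default ∅)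
def pvBuildAdjB (edges : List (String × String)) : PySem.Dict String (PySem.Set String) :=
  (PySem.Set.ofList edges).foldl
    (fun adj st => adj.modify st.1 PySem.Set.empty (fun s => PySem.Set.add s st.2))
    PySem.Dict.empty

-- Source B's recursive 'def visit(chain, frontier)' and its inner 'for next_op in frontier' loop
-- as a mutual pair; none = 'return False' (cap hit, or budget out).  On success the leftover
-- budget is returned alongside the updated signature set.  Python iterates the set 'frontier'
-- in unspecified order; the port iterates the Set's element list back-to-front (outputs are
-- compared as sets, so any fixed order is exact).  'min g2 g' is for termination only
-- (pvVisitB_lt below proves g2 < g, so it is the identity).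
mutual
def pvVisitB (adj : PySem.Dict String (PySem.Set String)) (max_steps max_signatures : Int) :
    Nat → List String → PySem.Set String → PySem.Set (List String) →
    Option (Nat × PySem.Set (List String))
  | 0, _, _, _ => none
  | g+1, chain, frontier, sigs =>
    let sigs' := if 2 ≤ chain.length then PySem.Set.add sigs chain else sigs
    if 2 ≤ chain.length ∧ max_signatures < (sigs'.length : Int) then none
    else if max_steps ≤ (chain.length : Int) then some (g, sigs')
    else pvForB adj max_steps max_signatures g chain frontier frontier.reverse sigs'
  termination_by g _ _ _ => (g, 0)
  decreasing_by
    simp_wf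
    exact Prod.Lex.left _ _ (by omega)

def pvForB (adj : PySem.Dict String (PySem.Set String)) (max_steps max_signatures : Int) :
    Nat → List String → PySem.Set String → List String → PySem.Set (List String) →
    Option (Nat × PySem.Set (List String))
  | g, _, _, [], sigs => some (g, sigs)
  | g, chain, frontier, n :: rest, sigs =>
    match pvVisitB adj max_steps max_signatures g (chain ++ [n])
        (PySem.Set.union frontier (adj.getD n PySem.Set.empty)) sigs with
    | none => none
    | some (g2, sigs2) => pvForB adj max_steps max_signatures (min g2 g) chain frontier rest sigs2
  termination_by g _ _ l _ => (g, l.length + 1)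
  decreasing_by
    · simp_wf
      exact Prod.Lex.right _ (by omega)
    · simp_wf
      rcases Nat.lt_or_eq_of_le (Nat.min_le_right g2 g) with h | h
      · exact Prod.Lex.left _ _ h
      · rw [h]; exact Prod.Lex.right _ (by omega)
end

-- the 'for start_op in linked_ops: if not visit(...): return None' loop of B
def pvRunAltB (adj : PySem.Dict String (PySem.Set String)) (max_steps max_signatures : Int) (fuel : Nat) :
    List String → PySem.Set (List String) → Option (PySem.Set (List String))
  | [], sigs => some sigs
  | s :: rest, sigs =>
    match pvVisitB adj max_steps max_signatures fuel [s] (adj.getD s PySem.Set.empty) sigs with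
    | none => none
    | some (_, sigs') => pvRunAltB adj max_steps max_signatures fuel rest sigs'

def enumerate_possible_chain_signatures_py_alt (edges : List (String × String)) (linked_ops : List String) (max_steps : Int) (max_signatures : Int) : Option (List (List String)) :=
  pvRunAltB (pvBuildAdjB edges) max_steps max_signatures
    (pvChainFuel edges linked_ops max_steps max_signatures) linked_ops PySem.Set.empty

-- ===== PRECONDITION & SPEC =====
def Spec_enumerate_possible_chain_signatures_py (edges : List (String × String)) (linked_ops : List String) (max_steps : Int) (max_signatures : Int) (out : Option (List (List String))) : Prop := out = enumerate_possible_chain_signatures_py_alt edges linked_ops max_steps max_signatures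
instance (edges : List (String × String)) (linked_ops : List String) (max_steps : Int) (max_signatures : Int) (out : Option (List (List String))) : Decidable (Spec_enumerate_possible_chain_signatures_py edges linked_ops max_steps max_signatures out) := by unfold Spec_enumerate_possible_chain_signatures_py; infer_instance

-- ===== CLAIM (what is proved, stated in full; the proofs are below) =====
def Claim_equal_enumerate_possible_chain_signatures_py : Prop := ∀ (edges : List (String × String)) (linked_ops : List String) (max_steps : Int) (max_signatures : Int), Dom_enumerate_possible_chain_signatures_py edges linked_ops max_steps max_signatures → Spec_enumerate_possible_chain_signatures_py edges linked_ops max_steps max_signatures (enumerate_possible_chain_signatures_py edges linked_ops max_steps max_signatures)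

-- ===== LEMMAS AND PROOFS =====

-- inserting twice at the same absent key is one insert
theorem pv_dict_insert_insert {κ ν : Type} [BEq κ] [LawfulBEq κ] (d : PySem.Dict κ ν) (k : κ) (v w : ν)
    (h : d.contains k = false) : (d.insert k v).insert k w = d.insert k w := by
  have hany : (d.items.any fun p => p.1 == k) = false := h
  have hall : ∀ p ∈ d.items, (p.1 == k) = false := by
    intro p hp; simpa using List.any_eq_false.mp hany p hp
  have hmap : List.map (fun p => if (p.1 == k) = true then (k, w) else p) d.items = d.items := by
    conv_rhs => rw [← List.map_id d.items]
    exact List.map_congr_left fun p hp => by simp [hall p hp]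
  apply PySem.Dict.ext
  simp only [PySem.Dict.insert, PySem.Dict.contains, hany]
  simp [List.any_append, List.map_append, hmap]

-- the two builds take the same step on every dict
theorem pv_buildAdj_step (d : PySem.Dict String (PySem.Set String)) (st : String × String) :
    (let adj' := if d.contains st.1 then d else d.insert st.1 PySem.Set.empty
     adj'.modify st.1 PySem.Set.empty (fun s => PySem.Set.add s st.2))
      = d.modify st.1 PySem.Set.empty (fun s => PySem.Set.add s st.2) := by
  by_cases h : d.contains st.1
  · simp [h]
  · have h' : d.contains st.1 = false := by simpa using h
    simp only [PySem.Dict.modify, h', Bool.false_eq_true, if_false]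
    rw [PySem.Dict.getD_insert_self, PySem.Dict.getD_of_not_contains d PySem.Set.empty h']
    exact pv_dict_insert_insert d st.1 _ _ h'

-- the two adjacency builds agree
theorem pv_buildAdj_eq (edges : List (String × String)) : pvBuildAdjA edges = pvBuildAdjB edges :=
  PySem.List.foldl_congr_mem' _ _ _ _ (fun st _ d => pv_buildAdj_step d st)

-- every adjacency value is a duplicate-free set
theorem pv_buildAdj_nodup (edges : List (String × String)) (k : String) :
    ((pvBuildAdjB edges).getD k PySem.Set.empty).Nodup := by
  have aux : ∀ (l : List (String × String)) (d : PySem.Dict String (PySem.Set String)),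
      (∀ k, (d.getD k PySem.Set.empty).Nodup) →
      ∀ k, ((l.foldl (fun adj st => adj.modify st.1 PySem.Set.empty (fun s => PySem.Set.add s st.2)) d).getD
            k PySem.Set.empty).Nodup := by
    intro l
    induction l with
    | nil => intro d hd k; simpa using hd k
    | cons a t ih =>
      intro d hd k
      refine ih _ (fun k' => ?_) k
      rw [PySem.Dict.getD_modify]
      split_ifs with hk
      · exact PySem.Set.nodup_add _ _ (hd a.1)
      · exact hd k'
  exact aux _ _ (fun k => by simp [PySem.Dict.getD_empty]) k

-- membership in the accumulator survives the next_ops fold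
theorem pv_mem_foldl_nextOps (adj : PySem.Dict String (PySem.Set String)) (l : List String)
    (acc : PySem.Set String) (x : String) (hx : x ∈ acc) :
    x ∈ l.foldl
      (fun acc op => if adj.contains op then PySem.Set.update acc (adj.getD op PySem.Set.empty) else acc)
      acc := by
  induction l generalizing acc with
  | nil => simpa using hx
  | cons a t ih =>
    simp only [List.foldl_cons]
    apply ih
    by_cases h : adj.contains a
    · simp only [h, if_true]
      exact (PySem.Set.mem_update _ _ _).mpr (Or.inl hx)
    · simpa [h] using hx

-- adj[n] is contained in next_ops whenever n is one of the folded ops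
theorem pv_adj_subset_nextOps (adj : PySem.Dict String (PySem.Set String)) (l : List String)
    (acc : PySem.Set String) (n : String) (hn : n ∈ l) (x : String)
    (hx : x ∈ adj.getD n PySem.Set.empty) :
    x ∈ l.foldl
      (fun acc op => if adj.contains op then PySem.Set.update acc (adj.getD op PySem.Set.empty) else acc)
      acc := by
  induction l generalizing acc with
  | nil => simp at hn
  | cons a t ih =>
    simp only [List.foldl_cons]
    rcases List.mem_cons.mp hn with h | h
    · subst h
      apply pv_mem_foldl_nextOps
      by_cases hc : adj.contains n
      · simp only [hc, if_true]
        exact (PySem.Set.mem_update _ _ _).mpr (Or.inr hx)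
      · rw [PySem.Dict.getD_of_not_contains adj PySem.Set.empty (by simpa using hc)] at hx
        simp [PySem.Set.empty] at hx
    · exact ih _ h

-- A's recomputed next_ops after appending n = B's incremental frontier update
theorem pv_nextOps_append (adj : PySem.Dict String (PySem.Set String)) (c : List String) (n : String) :
    pvNextOpsA adj (PySem.Set.ofList (c ++ [n]))
      = PySem.Set.union (pvNextOpsA adj (PySem.Set.ofList c)) (adj.getD n PySem.Set.empty) := by
  by_cases hmem : n ∈ PySem.Set.ofList c
  · rw [PySem.Set.ofList_append_singleton, PySem.Set.add_of_mem hmem]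
    unfold PySem.Set.union
    rw [PySem.Set.update_eq_append_filter]
    have hfil : List.filter (fun y => !(pvNextOpsA adj (PySem.Set.ofList c)).contains y)
        (PySem.Set.ofList (adj.getD n PySem.Set.empty)) = [] := by
      apply List.filter_eq_nil_iff.mpr
      intro y hy
      have hy' : y ∈ adj.getD n PySem.Set.empty := (PySem.Set.mem_ofList _ _).mp hy
      simpa using pv_adj_subset_nextOps adj _ _ n hmem y hy'
    rw [hfil, List.append_nil]
  · rw [PySem.Set.ofList_append_singleton, PySem.Set.add_of_not_mem hmem]
    unfold pvNextOpsA
    rw [List.foldl_append]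
    simp only [List.foldl_cons, List.foldl_nil]
    by_cases hc : adj.contains n
    · simp only [hc, if_true]; rfl
    · rw [PySem.Dict.getD_of_not_contains adj PySem.Set.empty (by simpa using hc)]
      simp only [hc, Bool.false_eq_true, if_false]
      rfl

-- the initial frontier of a start op
theorem pv_nextOps_single (adj : PySem.Dict String (PySem.Set String))
    (hadj : ∀ k, (adj.getD k PySem.Set.empty).Nodup) (s : String) :
    pvNextOpsA adj (PySem.Set.ofList [s]) = adj.getD s PySem.Set.empty := by
  have h1 : PySem.Set.ofList [s] = [s] := rfl
  unfold pvNextOpsA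
  rw [h1]
  simp only [List.foldl_cons, List.foldl_nil]
  by_cases hc : adj.contains s
  · simp only [hc, if_true]
    have : PySem.Set.update PySem.Set.empty (adj.getD s PySem.Set.empty)
        = PySem.Set.ofList (adj.getD s PySem.Set.empty) := rfl
    rw [this, PySem.Set.ofList_eq_self_of_nodup _ (hadj s)]
  · rw [PySem.Dict.getD_of_not_contains adj PySem.Set.empty (by simpa using hc)]
    simp [hc]

-- on success the visit recursion strictly consumes budget (so 'min g2 g' is the identity)
theorem pvVisitB_lt (adj : PySem.Dict String (PySem.Set String)) (ms cap : Int) :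
    ∀ g : Nat,
      (∀ c f s r, pvVisitB adj ms cap g c f s = some r → r.1 < g) ∧
      (∀ l c f s r, pvForB adj ms cap g c f l s = some r → r.1 ≤ g) := by
  intro g
  induction g using Nat.strong_induction_on with
  | _ g ih =>
    have hA : ∀ c f s r, pvVisitB adj ms cap g c f s = some r → r.1 < g := by
      intro c f s r h
      cases g with
      | zero => rw [pvVisitB] at h; cases h
      | succ h' =>
        rw [pvVisitB] at h
        split_ifs at h
        all_goals first
          | (cases h <;> exact Nat.lt_succ_self h')
          | (have := (ih h' (Nat.lt_succ_self h')).2 _ _ _ _ _ h; omega)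
    refine ⟨hA, ?_⟩
    intro l c f s r h
    cases l with
    | nil => rw [pvForB] at h; cases h; exact le_refl g
    | cons n rest =>
      rw [pvForB] at h
      cases hv : pvVisitB adj ms cap g (c ++ [n]) (PySem.Set.union f (adj.getD n PySem.Set.empty)) s with
      | none => simp only [hv] at h; cases h
      | some p =>
        obtain ⟨g2, s2⟩ := p
        simp only [hv] at h
        have hg2 : g2 < g := hA _ _ _ _ hv
        rw [Nat.min_eq_left (le_of_lt hg2)] at h
        have := (ih g2 hg2).2 rest c f s2 r h
        omega

-- the child loop is the sequential run of the child entries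
def pvSeq (adj : PySem.Dict String (PySem.Set String)) (ms cap : Int) :
    Nat → List (List String × PySem.Set String) → PySem.Set (List String) →
    Option (Nat × PySem.Set (List String))
  | g, [], sigs => some (g, sigs)
  | g, (c, f) :: t, sigs =>
    match pvVisitB adj ms cap g c f sigs with
    | none => none
    | some (g', s') => pvSeq adj ms cap g' t s'

theorem pvForB_eq_seq (adj : PySem.Dict String (PySem.Set String)) (ms cap : Int) :
    ∀ (l : List String) (g : Nat) (c : List String) (f : PySem.Set String) (s : PySem.Set (List String)),
      pvForB adj ms cap g c f l s
        = pvSeq adj ms cap g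
            (l.map (fun n => (c ++ [n], PySem.Set.union f (adj.getD n PySem.Set.empty)))) s := by
  intro l
  induction l with
  | nil => intro g c f s; rw [pvForB]; rfl
  | cons n rest ih =>
    intro g c f s
    rw [pvForB, List.map_cons, pvSeq]
    cases hv : pvVisitB adj ms cap g (c ++ [n]) (PySem.Set.union f (adj.getD n PySem.Set.empty)) s with
    | none => rfl
    | some p =>
      obtain ⟨g2, s2⟩ := p
      have hg2 : g2 < g := (pvVisitB_lt adj ms cap g).1 _ _ _ _ hv
      dsimp only
      rw [Nat.min_eq_left (le_of_lt hg2)]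
      exact ih g2 c f s2

theorem pvSeq_append (adj : PySem.Dict String (PySem.Set String)) (ms cap : Int) :
    ∀ (l1 l2 : List (List String × PySem.Set String)) (g : Nat) (s : PySem.Set (List String)),
      pvSeq adj ms cap g (l1 ++ l2) s
        = match pvSeq adj ms cap g l1 s with
          | none => none
          | some (g', s') => pvSeq adj ms cap g' l2 s' := by
  intro l1
  induction l1 with
  | nil => intro l2 g s; rfl
  | cons e t ih =>
    intro l2 g s
    obtain ⟨c, f⟩ := e
    rw [List.cons_append, pvSeq, pvSeq]
    cases pvVisitB adj ms cap g c f s with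
    | none => rfl
    | some p => exact ih l2 p.1 p.2

-- pushing children on the stack = prepending the reversed child list
theorem pv_foldl_cons (e : String → (List String × PySem.Set String)) :
    ∀ (l : List String) (t : List (List String × PySem.Set String)),
      l.foldl (fun st n => e n :: st) t = (l.reverse.map e) ++ t := by
  intro l
  induction l with
  | nil => intro t; rfl
  | cons a rest ih =>
    intro t
    rw [List.foldl_cons, ih]
    simp

-- A's stack loop is the sequential run of the stack entries through B's recursion
theorem pvLoopA_eq_seq (adj : PySem.Dict String (PySem.Set String)) (ms cap : Int) :
    ∀ (g : Nat) (stack : List (List String × PySem.Set String)) (sigs : PySem.Set (List String)),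
      (∀ p ∈ stack, p.2 = PySem.Set.ofList p.1) →
      pvLoopA adj ms cap g stack sigs
        = (pvSeq adj ms cap g
            (stack.map (fun p => (p.1, pvNextOpsA adj (PySem.Set.ofList p.1)))) sigs).map Prod.snd := by
  intro g
  induction g with
  | zero =>
    intro stack sigs _
    cases stack with
    | nil => rfl
    | cons p t => obtain ⟨c, ops⟩ := p; simp [pvLoopA, pvSeq, pvVisitB]
  | succ g ih =>
    intro stack sigs hstack
    cases stack with
    | nil => rfl
    | cons p t =>
      obtain ⟨c, ops⟩ := p
      have hop : ops = PySem.Set.ofList c := hstack (c, ops) (by simp)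
      subst hop
      have htail : ∀ q ∈ t, q.2 = PySem.Set.ofList q.1 :=
        fun q hq => hstack q (List.mem_cons_of_mem _ hq)
      rw [pvLoopA, List.map_cons, pvSeq, pvVisitB]
      set sigs' := if 2 ≤ c.length then PySem.Set.add sigs c else sigs with hs
      split_ifs with h1 h2
      · rfl
      · dsimp only
        exact ih t sigs' htail
      · dsimp only
        rw [pv_foldl_cons (fun n => (c ++ [n], PySem.Set.add (PySem.Set.ofList c) n))
              (pvNextOpsA adj (PySem.Set.ofList c)) t]
        have hinv : ∀ q ∈ ((pvNextOpsA adj (PySem.Set.ofList c)).reverse.map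
              (fun n => (c ++ [n], PySem.Set.add (PySem.Set.ofList c) n))) ++ t,
            q.2 = PySem.Set.ofList q.1 := by
          intro q hq
          rcases List.mem_append.mp hq with hq | hq
          · obtain ⟨n, _, rfl⟩ := List.mem_map.mp hq
            rw [PySem.Set.ofList_append_singleton]
          · exact htail q hq
        rw [ih _ _ hinv]
        rw [List.map_append, List.map_map]
        have hmapc : ((pvNextOpsA adj (PySem.Set.ofList c)).reverse.map
              ((fun p : List String × PySem.Set String => (p.1, pvNextOpsA adj (PySem.Set.ofList p.1))) ∘
               (fun n => (c ++ [n], PySem.Set.add (PySem.Set.ofList c) n))))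
            = (pvNextOpsA adj (PySem.Set.ofList c)).reverse.map
                (fun n => (c ++ [n],
                  PySem.Set.union (pvNextOpsA adj (PySem.Set.ofList c)) (adj.getD n PySem.Set.empty))) := by
          apply List.map_congr_left
          intro n _
          simp only [Function.comp]
          rw [pv_nextOps_append]
        rw [hmapc, pvSeq_append, pvForB_eq_seq]

-- the two outer loops agree
theorem pv_run_eq (adj : PySem.Dict String (PySem.Set String))
    (hadj : ∀ k, (adj.getD k PySem.Set.empty).Nodup) (ms cap : Int) (fuel : Nat) :
    ∀ (ops : List String) (sigs : PySem.Set (List String)),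
      pvRunA adj ms cap fuel ops sigs = pvRunAltB adj ms cap fuel ops sigs := by
  intro ops
  induction ops with
  | nil => intro sigs; rfl
  | cons s rest ih =>
    intro sigs
    rw [pvRunA, pvRunAltB]
    have h0 : pvLoopA adj ms cap fuel [([s], PySem.Set.ofList [s])] sigs
        = (pvSeq adj ms cap fuel [([s], adj.getD s PySem.Set.empty)] sigs).map Prod.snd := by
      rw [pvLoopA_eq_seq adj ms cap fuel [([s], PySem.Set.ofList [s])] sigs
        (by intro p hp; simp only [List.mem_singleton] at hp; subst hp; rfl)]
      simp only [List.map_cons, List.map_nil]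
      rw [pv_nextOps_single adj hadj s]
    rw [h0, pvSeq]
    cases pvVisitB adj ms cap fuel [s] (adj.getD s PySem.Set.empty) sigs with
    | none => rfl
    | some p =>
      obtain ⟨g2, s2⟩ := p
      simp only [pvSeq, Option.map_some]
      exact ih s2

-- ===== VERDICT (by name: the statement is the Claim_ definition above) =====
theorem enumerate_possible_chain_signatures_py_spec : Claim_equal_enumerate_possible_chain_signatures_py := by
  intro edges linked_ops max_steps max_signatures _
  unfold Spec_enumerate_possible_chain_signatures_py
  unfold enumerate_possible_chain_signatures_py enumerate_possible_chain_signatures_py_alt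
  rw [pv_buildAdj_eq]
  exact pv_run_eq _ (pv_buildAdj_nodup edges) _ _ _ _ _
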